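-- pv_equiv track=rewrite | github.com/krzysiek951/PrettyBom | web_app/functions.py | get_position_delimiter
-- ===== SOURCE A (Python) =====
-- from typing import Optional
--
-- def get_position_delimiter(string: str) -> Optional[str]:
--     """" Returns unique non-digit delimiter between numbers. """
--     delimiter_candidates = {char for char in string if not char.isdigit()}
--     if len(delimiter_candidates) > 1:
--         raise ValueError("Only one number delimiter is allowed.")
--     if not delimiter_candidates:
--         return None
--     delimiter = ''.join(delimiter_candidates)
--     return delimiter
-- ===== SOURCE B (Python) =====
-- from typing import Optional
--
--
-- def get_position_delimiter(string: str) -> Optional[str]: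
--     """ Returns unique non-digit delimiter between numbers. """
--     delimiter = None
--     for char in string:
--         if char.isdigit():
--             continue
--         if delimiter is None:
--             delimiter = char
--         elif char != delimiter:
--             raise ValueError("Only one number delimiter is allowed.")
--     return delimiter
-- ===== Notes on version B (the rewrite author's own statement) =====
-- stated objective: simpler
-- what changed: B replaces the set comprehension + length check + join with a single pass keeping one scalar candidate, raising inline as soon as a second distinct non-digit character appears.
import Mathlib
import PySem

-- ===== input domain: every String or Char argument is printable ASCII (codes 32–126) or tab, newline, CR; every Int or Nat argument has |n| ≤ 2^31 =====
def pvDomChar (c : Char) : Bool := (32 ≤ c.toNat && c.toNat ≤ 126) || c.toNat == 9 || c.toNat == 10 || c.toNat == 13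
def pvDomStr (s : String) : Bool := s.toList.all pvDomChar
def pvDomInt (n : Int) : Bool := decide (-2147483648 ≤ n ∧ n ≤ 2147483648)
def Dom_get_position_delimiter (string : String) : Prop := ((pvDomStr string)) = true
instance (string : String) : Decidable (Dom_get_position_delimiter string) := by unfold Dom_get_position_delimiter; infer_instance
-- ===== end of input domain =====

-- B replaces A's set comprehension + length check + join with a single pass that keeps one
-- scalar candidate and raises inline on a second distinct non-digit character (objective: simpler).

-- ===== PORT A =====
def get_position_delimiter (string : String) : Option String :=
  let delimiter_candidates : PySem.Set Char :=
    PySem.Set.ofList (string.toList.filter (fun c => !(PySem.Chars.isdigit c)))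
  if 1 < PySem.Set.len delimiter_candidates then
    none  -- raise ValueError("Only one number delimiter is allowed.")  — excluded by Pre_
  else if delimiter_candidates = [] then
    none
  else
    some (String.ofList delimiter_candidates)  -- ''.join(set); the set has one element here

-- ===== PORT B =====
-- the loop: acc is the scalar 'delimiter'; the 'raise' branch is unreachable under Pre_
def pvBLoop : List Char → Option Char → Option Char
  | [], acc => acc
  | c :: rest, acc =>
    if PySem.Chars.isdigit c then pvBLoop rest acc
    else
      match acc with
      | none => pvBLoop rest (some c)
      | some d =>
        if c ≠ d then none  -- raise ValueError("Only one number delimiter is allowed.")  — excluded by Pre_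
        else pvBLoop rest (some d)

def get_position_delimiter_alt (string : String) : Option String :=
  (pvBLoop string.toList none).map (fun c => String.ofList [c])

-- ===== PRECONDITION & SPEC =====
-- Pre_ excludes exactly the inputs with two distinct non-digit characters, on which
-- the Python A (and B alike) raises ValueError.
def Pre_get_position_delimiter (string : String) : Prop :=
  ((string.toList.filter (fun c => !(PySem.Chars.isdigit c))).all
    (fun c => (string.toList.filter (fun d => !(PySem.Chars.isdigit d))).all (fun d => c == d))) = true
instance (string : String) : Decidable (Pre_get_position_delimiter string) := by
  unfold Pre_get_position_delimiter; infer_instance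
def pvWitness_get_position_delimiter : String := ","

def Spec_get_position_delimiter (string : String) (out : Option String) : Prop := out = get_position_delimiter_alt string
instance (string : String) (out : Option String) : Decidable (Spec_get_position_delimiter string out) := by unfold Spec_get_position_delimiter; infer_instance

-- ===== CLAIM (what is proved, stated in full; the proofs are below) =====
def Claim_equal_get_position_delimiter : Prop := ∀ (string : String), Dom_get_position_delimiter string → Pre_get_position_delimiter string → Spec_get_position_delimiter string (get_position_delimiter string)

-- ===== LEMMAS AND PROOFS =====

-- B's loop keeps an already-found delimiter when every non-digit char equals it
lemma pvBLoop_some (l : List Char) (a : Char)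
    (H : ∀ c ∈ l, PySem.Chars.isdigit c = false → c = a) :
    pvBLoop l (some a) = some a := by
  induction l with
  | nil => rfl
  | cons c rest ih =>
    simp only [pvBLoop]
    by_cases hd : PySem.Chars.isdigit c
    · simp only [hd, if_true]
      exact ih (fun x hx h => H x (by simp [hx]) h)
    · have hca : c = a := H c (by simp) (by simpa using hd)
      subst hca
      rw [if_neg hd, if_neg (by simp : ¬ (c ≠ c))]
      exact ih (fun x hx h => H x (by simp [hx]) h)
      
lemma pvBLoop_none (l : List Char)
    (H : ∀ c ∈ l, ∀ d ∈ l, PySem.Chars.isdigit c = false → PySem.Chars.isdigit d = false → c = d) :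
    pvBLoop l none = (l.filter (fun c => !(PySem.Chars.isdigit c))).head? := by
  induction l with
  | nil => rfl
  | cons c rest ih =>
    simp only [pvBLoop]
    by_cases hd : PySem.Chars.isdigit c
    · simp only [if_true, List.filter_cons, hd, Bool.not_true]
      rw [ih (fun x hx y hy => H x (by simp [hx]) y (by simp [hy]))]
      simp
    · have hnd : PySem.Chars.isdigit c = false := by simpa using hd
      simp only [hd, List.filter_cons, Bool.not_false, if_true, List.head?_cons]
      exact pvBLoop_some rest c (fun x hx hxn => H x (by simp [hx]) c (by simp) hxn hnd)

-- adding elements already in the set leaves it unchanged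
lemma foldl_add_subset (l : List Char) (s : PySem.Set Char) (H : ∀ x ∈ l, x ∈ s) :
    l.foldl PySem.Set.add s = s := by
  induction l with
  | nil => rfl
  | cons x rest ih =>
    have hx : PySem.Set.add s x = s := by
      simp only [PySem.Set.add]
      rw [if_pos]
      simpa [PySem.Set.contains] using H x (by simp)
    simp only [List.foldl_cons, hx]
    exact ih (fun y hy => H y (by simp [hy]))

-- the set of a constant-valued list is [] or a singleton headed by head?
lemma ofList_const (xs : List Char) (h : ∀ x ∈ xs, ∀ y ∈ xs, x = y) :
    PySem.Set.ofList xs = xs.head?.toList := by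
  cases xs with
  | nil => rfl
  | cons a rest =>
    rw [PySem.Set.ofList_eq_foldl]
    simp only [List.foldl_cons, Option.toList_some, List.head?_cons]
    have h1 : PySem.Set.add [] a = [a] := by simp [PySem.Set.add, PySem.Set.contains]
    rw [h1]
    exact foldl_add_subset rest [a]
      (fun x hx => by simp [h x (by simp [hx]) a (by simp)])

-- ===== VERDICT (by name: the statement is the Claim_ definition above) =====
theorem get_position_delimiter_spec : Claim_equal_get_position_delimiter := by
  intro s _ hpre0
  unfold Pre_get_position_delimiter at hpre0
  have hpre : ∀ c ∈ s.toList, ∀ d ∈ s.toList,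
      PySem.Chars.isdigit c = false → PySem.Chars.isdigit d = false → c = d := by
    intro c hc d hd hcn hdn
    have h1 := List.all_eq_true.mp hpre0 c (List.mem_filter.mpr ⟨hc, by simp [hcn]⟩)
    have h2 := List.all_eq_true.mp h1 d (List.mem_filter.mpr ⟨hd, by simp [hdn]⟩)
    exact eq_of_beq h2
  unfold Spec_get_position_delimiter get_position_delimiter get_position_delimiter_alt
  have hfilt : ∀ x ∈ s.toList.filter (fun c => !(PySem.Chars.isdigit c)),
      ∀ y ∈ s.toList.filter (fun c => !(PySem.Chars.isdigit c)), x = y := by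
    intro x hx y hy
    simp only [List.mem_filter, Bool.not_eq_true'] at hx hy
    exact hpre x hx.1 y hy.1 hx.2 hy.2
  rw [pvBLoop_none s.toList hpre, ofList_const _ hfilt]
  cases hh : (s.toList.filter (fun c => !(PySem.Chars.isdigit c))).head? with
  | none => simp [PySem.Set.len]
  | some c => simp [PySem.Set.len]
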